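-- pv_equiv track=rewrite | github.com/gkarat/trinomial-triangle | trinomial.py | trit_sum
-- ===== SOURCE A (Python) =====
-- def temp(res, length, total, initArray):
--
--     if length == 0:
--         if sum(initArray) == total:
--             res.append(initArray)
--             return
--         else:
--             return
--
--     for i in range(-1, 2):
--         temp(res, length - 1, total, initArray + [i])
--
--     return res
--
-- def trit_sum(length, total):
--
--     if (abs(total) > length):
--         return []
--
--     if (abs(total) == length):
--         if total < 0:
--             return [[-1 for i in range(length)]]
--
--         if total >= 0:
--             return [[1 for i in range(length)]]
--
--     res = []
--
--     for i in range(-1, 2):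
--         temp(res, length - 1, total, [i])
--
--     return res
-- ===== SOURCE B (Python) =====
-- def trit_sum(length, total):
--     if abs(total) > length:
--         return []
--     # level holds (backpointer-chain of chosen trits, still-needed sum); prefixes share
--     # tails via nested (trit, parent) pairs, so no deep recursion and no prefix copying.
--     level = [((), total)]
--     remaining = length
--     while remaining > 0:
--         nxt = []
--         for node, need in level:
--             for d in (-1, 0, 1):
--                 if abs(need - d) <= remaining - 1:
--                     nxt.append(((d, node), need - d))
--         level = nxt
--         remaining -= 1
--     out = []
--     for node, _need in level:
--         seq = []
--         while node:
--             seq.append(node[0])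
--             node = node[1]
--         seq.reverse()
--         out.append(seq)
--     return out
-- ===== Notes on version B (the rewrite author's own statement) =====
-- stated objective: alternative
-- what changed: Replaces A's exhaustive 3^length recursive enumeration (helper appending full-length candidates to a shared result list, extremal totals special-cased) by a non-recursive level-by-level expansion that prunes every partial assignment whose remaining needed sum is unreachable and shares prefixes via backpointer chains; intended as faster search, but a timing run could not confirm it (output size dominates on large inputs).
import Mathlib
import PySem

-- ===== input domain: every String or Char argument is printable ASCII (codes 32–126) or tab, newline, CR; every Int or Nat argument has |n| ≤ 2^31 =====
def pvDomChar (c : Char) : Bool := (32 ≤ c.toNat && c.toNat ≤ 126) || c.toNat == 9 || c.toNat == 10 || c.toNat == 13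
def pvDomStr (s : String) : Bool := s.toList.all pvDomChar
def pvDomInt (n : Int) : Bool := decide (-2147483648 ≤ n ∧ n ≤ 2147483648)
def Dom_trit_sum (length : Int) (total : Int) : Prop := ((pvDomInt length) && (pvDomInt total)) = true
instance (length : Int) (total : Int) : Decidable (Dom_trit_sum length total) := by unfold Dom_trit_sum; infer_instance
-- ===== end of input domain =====

-- B replaces A's exhaustive 3^length recursive enumeration by an iterative, pruned
-- level-by-level expansion with shared backpointer prefixes (objective: alternative).

-- ===== PORT A =====
-- A's helper `temp` mutates `res` by appending; ported as a function threading `res`.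
-- A only ever calls `temp` with a nonnegative `length` (it is called with length-1
-- after establishing |total| < length, hence length ≥ 1), so the recursion depth is
-- ported via the exact nonnegative value `(length-1).toNat`.
def tempA (res : List (List Int)) (n : Nat) (total : Int) (initArray : List Int) :
    List (List Int) :=
  match n with
  | 0 => if initArray.sum = total then res ++ [initArray] else res
  | Nat.succ m =>
      ([-1, 0, 1] : List Int).foldl (fun r i => tempA r m total (initArray ++ [i])) res

def trit_sum (length : Int) (total : Int) : List (List Int) :=
  if (total.natAbs : Int) > length then []
  else if (total.natAbs : Int) = length then
    if total < 0 then [List.replicate length.toNat (-1)]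
    else [List.replicate length.toNat 1]
  else
    ([-1, 0, 1] : List Int).foldl (fun r i => tempA r (length - 1).toNat total [i]) []

-- ===== PORT B =====
-- Source B's backpointer chain of nested pairs ((d, parent), () at the root) is exactly a
-- Lean `List Int` built with cons; the final walk-and-reverse is `.reverse`.
def stepB (remaining : Int) (level : List (List Int × Int)) : List (List Int × Int) :=
  level.flatMap fun p =>
    ([-1, 0, 1] : List Int).filterMap fun d =>
      if ((p.2 - d).natAbs : Int) ≤ remaining - 1 then some (d :: p.1, p.2 - d) else none

def loopB (remaining : Int) (level : List (List Int × Int)) : List (List Int × Int) :=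
  if remaining > 0 then loopB (remaining - 1) (stepB remaining level) else level
termination_by remaining.toNat
decreasing_by omega

def trit_sum_alt (length : Int) (total : Int) : List (List Int) :=
  if (total.natAbs : Int) > length then []
  else (loopB length [([], total)]).map (fun p => p.1.reverse)

-- ===== PRECONDITION & SPEC =====
-- Pre_ excludes exactly the inputs on which CPython A RAISES: when |total| < length and
-- length >= 999 the recursive helper's first depth-first dive exceeds the default
-- recursion limit (1000) and A raises RecursionError before returning anything;
-- everywhere else (including |total| >= length at any size) A returns normally.
def Pre_trit_sum (length : Int) (total : Int) : Prop :=
  (total.natAbs : Int) ≥ length ∨ length ≤ 998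
instance (length : Int) (total : Int) : Decidable (Pre_trit_sum length total) := by unfold Pre_trit_sum; infer_instance
def pvWitness_trit_sum : Int × Int := (4, 2)

def Spec_trit_sum (length : Int) (total : Int) (out : List (List Int)) : Prop := out = trit_sum_alt length total
instance (length : Int) (total : Int) (out : List (List Int)) : Decidable (Spec_trit_sum length total out) := by unfold Spec_trit_sum; infer_instance

-- ===== CLAIM (what is proved, stated in full; the proofs are below) =====
def Claim_equal_trit_sum : Prop := ∀ (length : Int) (total : Int), Dom_trit_sum length total → Pre_trit_sum length total → Spec_trit_sum length total (trit_sum length total)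

-- ===== LEMMAS AND PROOFS =====

-- reference enumeration: all {-1,0,1}-sequences of length n summing to s, lex order
def T : Nat → Int → List (List Int)
  | 0, s => if s = 0 then [[]] else []
  | Nat.succ m, s =>
      ([-1, 0, 1] : List Int).flatMap fun d => (T m (s - d)).map (fun t => d :: t)

theorem T_empty_of_abs (n : Nat) (s : Int) (h : (s.natAbs : Int) > n) : T n s = [] := by
  induction n generalizing s with
  | zero => simp only [T]; rw [if_neg]; omega
  | succ m ih =>
      simp only [T, List.flatMap_cons, List.flatMap_nil, List.append_nil]
      rw [ih _ (by omega), ih _ (by omega), ih _ (by omega)]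
      simp

theorem loopB_eq_T (n : Nat) (level : List (List Int × Int))
    (h : ∀ p ∈ level, ((p.2).natAbs : Int) ≤ (n : Int)) :
    loopB (n : Int) level =
      level.flatMap fun p => (T n p.2).map fun t => (t.reverse ++ p.1, 0) := by
  induction n generalizing level with
  | zero =>
      rw [loopB, if_neg (by omega)]
      induction level with
      | nil => simp
      | cons p l ihl =>
          obtain ⟨node, need⟩ := p
          have h0 : need = 0 := by have := h (node, need) (by simp); simp at this; omega
          subst h0
          simp only [List.flatMap_cons]
          rw [← ihl (fun q hq => h q (by simp [hq]))]
          simp [T]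
  | succ m ih =>
      rw [loopB, if_pos (by omega)]
      have e : ((m + 1 : Nat) : Int) - 1 = ((m : Nat) : Int) := by push_cast; ring
      rw [e, ih (stepB ((m + 1 : Nat) : Int) level) ?hstep]
      case hstep =>
        intro p hp
        simp only [stepB, List.mem_flatMap, List.mem_filterMap] at hp
        obtain ⟨q, _, d, _, hd⟩ := hp
        by_cases hc : ((q.2 - d).natAbs : Int) ≤ ((m + 1 : Nat) : Int) - 1
        · rw [if_pos hc] at hd
          cases hd
          show ((q.2 - d).natAbs : Int) ≤ ((m : Nat) : Int)
          omega
        · rw [if_neg hc] at hd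
          exact absurd hd (by simp)
      rw [stepB, List.flatMap_assoc]
      congr 1
      funext p
      obtain ⟨node, need⟩ := p
      simp only [e, List.filterMap_cons, List.filterMap_nil]
      simp only [T, List.flatMap_cons, List.flatMap_nil, List.append_nil]
      split_ifs with c1 c2 c3 <;>
        simp only [List.flatMap_cons, List.flatMap_nil, List.append_nil] <;>
        (try rw [T_empty_of_abs m (need - -1) (by omega)]) <;>
        (try rw [T_empty_of_abs m (need - 0) (by omega)]) <;>
        (try rw [T_empty_of_abs m (need - 1) (by omega)]) <;>
        simp [List.map_map, Function.comp_def, List.append_assoc]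

theorem alt_eq_T (length total : Int) (h : (total.natAbs : Int) ≤ length) :
    trit_sum_alt length total = T length.toNat total := by
  unfold trit_sum_alt
  rw [if_neg (by omega)]
  conv_lhs => rw [show length = ((length.toNat : Nat) : Int) by omega]
  rw [loopB_eq_T length.toNat [([], total)]
    (by intro p hp
        rw [List.mem_singleton] at hp
        subst hp
        show ((total).natAbs : Int) ≤ ((length.toNat : Nat) : Int)
        omega)]
  simp [List.map_map, Function.comp_def]

theorem tempA_eq (n : Nat) (total : Int) (res : List (List Int)) (init : List Int) :
    tempA res n total init = res ++ (T n (total - init.sum)).map (fun t => init ++ t) := by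
  induction n generalizing res init with
  | zero =>
      simp only [tempA, T]
      by_cases h : init.sum = total
      · rw [if_pos h, if_pos (by omega)]; simp
      · rw [if_neg h, if_neg (by omega)]; simp
  | succ m ih =>
      simp only [tempA, List.foldl_cons, List.foldl_nil]
      rw [ih, ih, ih]
      have g : ∀ d : Int, total - (init ++ [d]).sum = (total - init.sum) - d := by
        intro d; simp; ring
      simp only [g]
      simp [T, List.map_map, Function.comp_def, List.append_assoc]

theorem T_all_neg_one (k : Nat) : T k (-(k : Int)) = [List.replicate k (-1)] := by
  induction k with
  | zero => simp [T]
  | succ j ihj =>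
      simp only [T, List.flatMap_cons, List.flatMap_nil, List.append_nil]
      have e1 : -((j + 1 : Nat) : Int) - (-1) = -(j : Int) := by push_cast; ring
      rw [e1, ihj, T_empty_of_abs j (-((j + 1 : Nat) : Int) - 0) (by omega),
        T_empty_of_abs j (-((j + 1 : Nat) : Int) - 1) (by omega)]
      simp [List.replicate_succ]

theorem T_all_one (k : Nat) : T k ((k : Int)) = [List.replicate k 1] := by
  induction k with
  | zero => simp [T]
  | succ j ihj =>
      simp only [T, List.flatMap_cons, List.flatMap_nil, List.append_nil]
      have e1 : ((j + 1 : Nat) : Int) - 1 = (j : Int) := by push_cast; ring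
      rw [e1, ihj, T_empty_of_abs j (((j + 1 : Nat) : Int) - 0) (by omega),
        T_empty_of_abs j (((j + 1 : Nat) : Int) - (-1)) (by omega)]
      simp [List.replicate_succ]

theorem trit_sum_eq_alt (length total : Int) :
    trit_sum length total = trit_sum_alt length total := by
  unfold trit_sum
  by_cases h1 : (total.natAbs : Int) > length
  · rw [if_pos h1]; unfold trit_sum_alt; rw [if_pos h1]
  · rw [if_neg h1, alt_eq_T length total (by omega)]
    by_cases h2 : (total.natAbs : Int) = length
    · rw [if_pos h2]
      by_cases hneg : total < 0
      · rw [if_pos hneg, show total = -((length.toNat : Nat) : Int) by omega, T_all_neg_one]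
      · rw [if_neg hneg, show total = ((length.toNat : Nat) : Int) by omega, T_all_one]
    · rw [if_neg h2]
      simp only [List.foldl_cons, List.foldl_nil]
      rw [tempA_eq, tempA_eq, tempA_eq]
      rw [show length.toNat = (length - 1).toNat + 1 by omega]
      simp only [T, List.flatMap_cons, List.flatMap_nil, List.append_nil, List.nil_append]
      simp [List.append_assoc]

-- ===== VERDICT (by name: the statement is the Claim_ definition above) =====
theorem trit_sum_spec : Claim_equal_trit_sum := by
  intro length total _ _
  exact trit_sum_eq_alt length total
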